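-- pv_equiv track=rewrite | github.com/Gayuys/Wind-noise-UI | A柱下端X向尺寸.py | get_top3_points_by_x2
-- ===== SOURCE A (Python) =====
-- def get_top3_points_by_x2(points):
--     # 按y坐标从小到大排序
--     sorted_points = sorted(points, key=lambda point: point[1])
--
--     # 使用集合记录已出现的点
--     seen = set()
--     result = []
--
--     # 遍历排序后的点，只添加未出现过的点
--     for point in sorted_points:
--         point_tuple = tuple(point)  # 转换为元组以便放入集合
--         if point_tuple not in seen:
--             seen.add(point_tuple)
--             result.append(point)
--
--             # 已收集到10个不同的点，提前结束
--             if len(result) == 5: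
--                 break
--
--     return result
-- ===== SOURCE B (Python) =====
-- def get_top3_points_by_x2(points):
--     # Deduplicate first (keep first occurrence of each point), then sort by y
--     # (stable) and slice off the first five.
--     seen = set()
--     unique = []
--     for p in points:
--         k = tuple(p)
--         if k not in seen:
--             seen.add(k)
--             unique.append(p)
--     return sorted(unique, key=lambda p: p[1])[:5]
-- ===== Notes on version B (the rewrite author's own statement) =====
-- stated objective: alternative
-- what changed: A sorts the whole list first and then scans it with a seen-set and an early break at five; B deduplicates the original list first (first occurrences), then stable-sorts only the distinct points by y and slices the first five, eliminating the early-break loop.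
import Mathlib
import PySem

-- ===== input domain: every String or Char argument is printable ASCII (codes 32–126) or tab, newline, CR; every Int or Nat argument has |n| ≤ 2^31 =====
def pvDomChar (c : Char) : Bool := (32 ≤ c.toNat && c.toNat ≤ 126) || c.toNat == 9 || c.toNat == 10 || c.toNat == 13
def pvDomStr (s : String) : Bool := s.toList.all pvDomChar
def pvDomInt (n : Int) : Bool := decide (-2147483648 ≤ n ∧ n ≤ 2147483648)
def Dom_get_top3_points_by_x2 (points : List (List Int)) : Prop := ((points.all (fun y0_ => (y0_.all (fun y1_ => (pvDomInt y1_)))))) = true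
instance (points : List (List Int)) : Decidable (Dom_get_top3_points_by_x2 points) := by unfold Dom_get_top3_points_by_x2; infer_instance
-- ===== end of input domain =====

-- B deduplicates first and then stable-sorts the distinct points by y and takes five,
-- instead of A's sort-everything-then-scan-with-early-break; same return value on Pre_.

-- ===== PORT A =====
-- key=lambda point: point[1]; under Pre_ every point has length ≥ 2, so pyGetD's default is never used
def pvKey (p : List Int) : Int := PySem.List.pyGetD p 1 0

-- the 'for point in sorted_points' loop with the seen set and the break at len(result) == 5
def pvALoop : List (List Int) → PySem.Set (List Int) → List (List Int) → List (List Int)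
  | [], _, result => result
  | point :: rest, seen, result =>
    if PySem.Set.contains seen point then pvALoop rest seen result
    else
      let seen' := PySem.Set.add seen point
      let result' := result ++ [point]
      if result'.length = 5 then result' else pvALoop rest seen' result'

def get_top3_points_by_x2 (points : List (List Int)) : List (List Int) :=
  let sorted_points := PySem.List.sorted points pvKey
  pvALoop sorted_points PySem.Set.empty []

-- ===== PORT B =====
def get_top3_points_by_x2_alt (points : List (List Int)) : List (List Int) :=
  -- the dedup loop: seen set and unique list of first occurrences
  let st := points.foldl
    (fun (st : PySem.Set (List Int) × List (List Int)) p =>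
      if PySem.Set.contains st.1 p then st else (PySem.Set.add st.1 p, st.2 ++ [p]))
    (PySem.Set.empty, [])
  -- sorted(unique, key=lambda p: p[1])[:5]
  (PySem.List.sorted st.2 pvKey).take 5

-- ===== PRECONDITION & SPEC =====
-- Pre_ excludes exactly the inputs where Python raises IndexError: a point of length < 2
-- makes point[1] fail inside the sort key (in A and in B alike).
def Pre_get_top3_points_by_x2 (points : List (List Int)) : Prop := ∀ p ∈ points, 2 ≤ p.length
instance (points : List (List Int)) : Decidable (Pre_get_top3_points_by_x2 points) := by unfold Pre_get_top3_points_by_x2; infer_instance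
def pvWitness_get_top3_points_by_x2 : List (List Int) := [[0, 1], [2, 3]]

def Spec_get_top3_points_by_x2 (points : List (List Int)) (out : List (List Int)) : Prop := out = get_top3_points_by_x2_alt points
instance (points : List (List Int)) (out : List (List Int)) : Decidable (Spec_get_top3_points_by_x2 points out) := by unfold Spec_get_top3_points_by_x2; infer_instance

-- ===== CLAIM (what is proved, stated in full; the proofs are below) =====
def Claim_equal_get_top3_points_by_x2 : Prop := ∀ (points : List (List Int)), Dom_get_top3_points_by_x2 points → Pre_get_top3_points_by_x2 points → Spec_get_top3_points_by_x2 points (get_top3_points_by_x2 points)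

-- ===== LEMMAS AND PROOFS =====

-- comparison function used by the stable insertion underlying PySem.List.sorted
def pvB (x y : List Int) : Bool := decide (pvKey x < pvKey y)

theorem pv_add_of_mem {s : PySem.Set (List Int)} {x : List Int} (h : x ∈ s) :
    PySem.Set.add s x = s := by
  simp [PySem.Set.add, PySem.Set.contains, h]

theorem pv_add_of_not_mem {s : PySem.Set (List Int)} {x : List Int} (h : x ∉ s) :
    PySem.Set.add s x = s ++ [x] := by
  simp [PySem.Set.add, PySem.Set.contains, h]

-- insertBy inserts before the first element the comparison accepts
theorem pv_insertBy_eq (b : List Int → List Int → Bool) (x : List Int) (l : List (List Int)) :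
    PySem.List.insertBy b x l
      = l.takeWhile (fun y => !b x y) ++ x :: l.dropWhile (fun y => !b x y) := by
  induction l with
  | nil => simp [PySem.List.insertBy]
  | cons y t ih =>
    by_cases h : b x y = true
    · simp [PySem.List.insertBy, h, List.takeWhile, List.dropWhile]
    · simp only [Bool.not_eq_true] at h
      simp [PySem.List.insertBy, h, List.takeWhile, List.dropWhile, ih]

-- insertBy over a "false part ++ true part" splits there
theorem pv_insertBy_append (x : List Int) (t v : List (List Int))
    (ht : ∀ y ∈ t, pvB x y = false) (hv : ∀ y ∈ v, pvB x y = true) :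
    PySem.List.insertBy pvB x (t ++ v) = t ++ x :: v := by
  induction t with
  | nil =>
    cases v with
    | nil => simp [PySem.List.insertBy]
    | cons d v' => simp [PySem.List.insertBy, hv d (by simp)]
  | cons y t' ih =>
    have hy : pvB x y = false := ht y (by simp)
    simp [PySem.List.insertBy, hy]
    exact ih (fun z hz => ht z (by simp [hz]))

-- a fold of Set.add only appends elements of the list
theorem pv_foldl_add_prefix (l : List (List Int)) :
    ∀ s : PySem.Set (List Int), ∃ r, l.foldl PySem.Set.add s = s ++ r ∧ ∀ y ∈ r, y ∈ l := by
  induction l with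
  | nil => intro s; exact ⟨[], by simp⟩
  | cons d l' ih =>
    intro s
    by_cases hd : d ∈ s
    · obtain ⟨r, hr, hm⟩ := ih s
      exact ⟨r, by simpa [pv_add_of_mem hd] using hr, fun y hy => by simp [hm y hy]⟩
    · obtain ⟨r, hr, hm⟩ := ih (s ++ [d])
      refine ⟨d :: r, ?_, ?_⟩
      · simpa [pv_add_of_not_mem hd] using hr
      · intro y hy
        rcases List.mem_cons.1 hy with h | h
        · simp [h]
        · simp [hm y h]
  
-- folding Set.add ignores an element x already placed in the accumulator, keeping it in place
theorem pv_foldl_add_skip {x : List Int} (D : List (List Int)) (hx : x ∉ D) :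
    ∀ s u : List (List Int), ∃ w,
      D.foldl PySem.Set.add (s ++ x :: u) = s ++ x :: (u ++ w) ∧
      D.foldl PySem.Set.add (s ++ u) = s ++ (u ++ w) ∧ ∀ y ∈ w, y ∈ D := by
  induction D with
  | nil => intro s u; exact ⟨[], by simp⟩
  | cons d D' ih =>
    have hdx : d ≠ x := fun h => hx (by simp [h])
    have hxD' : x ∉ D' := fun h => hx (by simp [h])
    intro s u
    by_cases hd : d ∈ s ++ u
    · have hd' : d ∈ s ++ x :: u := by
        rcases List.mem_append.1 hd with h | h
        · exact List.mem_append.2 (Or.inl h)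
        · exact List.mem_append.2 (Or.inr (by simp [h]))
      obtain ⟨w, h1, h2, h3⟩ := ih hxD' s u
      refine ⟨w, ?_, ?_, fun y hy => by simp [h3 y hy]⟩
      · simpa [pv_add_of_mem hd'] using h1
      · simpa [pv_add_of_mem hd] using h2
    · have hd' : d ∉ s ++ x :: u := by
        intro h
        rcases List.mem_append.1 h with h | h
        · exact hd (List.mem_append.2 (Or.inl h))
        · rcases List.mem_cons.1 h with h | h
          · exact hdx h
          · exact hd (List.mem_append.2 (Or.inr h))
      obtain ⟨w, h1, h2, h3⟩ := ih hxD' s (u ++ [d])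
      refine ⟨d :: w, ?_, ?_, ?_⟩
      · have : (s ++ x :: u) ++ [d] = s ++ x :: (u ++ [d]) := by simp
        rw [List.foldl_cons, pv_add_of_not_mem hd', this, h1]
        simp
      · have : (s ++ u) ++ [d] = s ++ (u ++ [d]) := by simp
        rw [List.foldl_cons, pv_add_of_not_mem hd, this, h2]
        simp
      · intro y hy
        rcases List.mem_cons.1 hy with h | h
        · simp [h]
        · simp [h3 y h]

theorem pv_ofList_append (a c : List (List Int)) :
    PySem.Set.ofList (a ++ c) = c.foldl PySem.Set.add (PySem.Set.ofList a) := by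
  simp [PySem.Set.ofList, List.foldl_append]

-- on a key-sorted list, every element of the dropWhile part compares strictly above x
theorem pv_dropWhile_true {x : List Int} {l : List (List Int)}
    (hl : l.Pairwise (fun a c => pvKey a ≤ pvKey c)) :
    ∀ y ∈ l.dropWhile (fun y => !pvB x y), pvB x y = true := by
  intro y hy
  rcases hDe : l.dropWhile (fun y => !pvB x y) with _ | ⟨h, tl⟩
  · rw [hDe] at hy; exact (List.not_mem_nil hy).elim
  · rw [hDe] at hy
    have hne : l.dropWhile (fun y => !pvB x y) ≠ [] := by rw [hDe]; simp
    have hhead := List.head_dropWhile_not (fun y => !pvB x y) hne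
    have hheq : (l.dropWhile (fun y => !pvB x y)).head hne = h := by
      simp [hDe]
    rw [hheq] at hhead
    simp only [Bool.not_eq_false'] at hhead
    have hpw : (h :: tl).Pairwise (fun a c => pvKey a ≤ pvKey c) := by
      rw [← hDe]; exact hl.sublist (List.dropWhile_sublist _)
    rcases List.mem_cons.1 hy with rfl | hmem
    · exact hhead
    · have h1 : pvKey x < pvKey h := of_decide_eq_true hhead
      have h2 : pvKey h ≤ pvKey y := (List.pairwise_cons.1 hpw).1 y hmem
      exact decide_eq_true (lt_of_lt_of_le h1 h2)

-- dedup absorbs inserting a duplicate (x already in the sorted list)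
theorem pv_ofList_insertBy_mem {x : List Int} {l : List (List Int)} (hx : x ∈ l)
    (hl : l.Pairwise (fun a c => pvKey a ≤ pvKey c)) :
    PySem.Set.ofList (PySem.List.insertBy pvB x l) = PySem.Set.ofList l := by
  set T := l.takeWhile (fun y => !pvB x y) with hT
  set D := l.dropWhile (fun y => !pvB x y) with hD
  have hsplit : T ++ D = l := List.takeWhile_append_dropWhile
  have hxT : x ∈ T := by
    rcases List.mem_append.1 (hsplit ▸ hx) with h | h
    · exact h
    · have := pv_dropWhile_true hl x h
      simp [pvB] at this
  rw [pv_insertBy_eq, ← hT, ← hD, pv_ofList_append, ← hsplit, pv_ofList_append,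
    List.foldl_cons, pv_add_of_mem ((PySem.Set.mem_ofList T x).2 hxT)]

-- dedup commutes with inserting a new element into the sorted list
theorem pv_ofList_insertBy_not_mem {x : List Int} {l : List (List Int)} (hx : x ∉ l)
    (hl : l.Pairwise (fun a c => pvKey a ≤ pvKey c)) :
    PySem.Set.ofList (PySem.List.insertBy pvB x l)
      = PySem.List.insertBy pvB x (PySem.Set.ofList l) := by
  set T := l.takeWhile (fun y => !pvB x y) with hT
  set D := l.dropWhile (fun y => !pvB x y) with hD
  have hsplit : T ++ D = l := List.takeWhile_append_dropWhile
  have hxT : x ∉ T := fun h => hx (hsplit ▸ List.mem_append.2 (Or.inl h))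
  have hxD : x ∉ D := fun h => hx (hsplit ▸ List.mem_append.2 (Or.inr h))
  have hTf : ∀ y ∈ T, pvB x y = false := by
    intro y hy
    have := List.mem_takeWhile_imp (hT ▸ hy)
    simpa using this
  have hDt : ∀ y ∈ D, pvB x y = true := pv_dropWhile_true hl
  have hxOT : x ∉ PySem.Set.ofList T := fun h => hxT ((PySem.Set.mem_ofList T x).1 h)
  obtain ⟨w, h1, h2, h3⟩ := pv_foldl_add_skip D hxD (PySem.Set.ofList T) []
  rw [pv_insertBy_eq, ← hT, ← hD, pv_ofList_append, List.foldl_cons,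
    pv_add_of_not_mem hxOT]
  have e1 : PySem.Set.ofList T ++ [x] = PySem.Set.ofList T ++ x :: ([] : List (List Int)) := by simp
  rw [e1, h1, ← hsplit, pv_ofList_append]
  have e2 : PySem.Set.ofList T = PySem.Set.ofList T ++ ([] : List (List Int)) := by simp
  rw [e2, h2]
  rw [pv_insertBy_append x (PySem.Set.ofList T) ([] ++ w)
      (fun y hy => hTf y ((PySem.Set.mem_ofList T y).1 hy))
      (fun y hy => hDt y (h3 y (by simpa using hy)))]
  simp

-- the crux: first-occurrence dedup commutes with Python's stable sort
theorem pv_ofList_sorted (xs : List (List Int)) :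
    PySem.Set.ofList (PySem.List.sorted xs pvKey)
      = PySem.List.sorted (PySem.Set.ofList xs) pvKey := by
  induction xs using List.reverseRecOn with
  | nil => simp [PySem.List.sorted, PySem.Set.ofList, PySem.Set.empty]
  | append_singleton xs x ih =>
    have hstep : ∀ l : List (List Int),
        PySem.List.sorted (l ++ [x]) pvKey = PySem.List.insertBy pvB x (PySem.List.sorted l pvKey) := by
      intro l
      rw [PySem.List.sorted_eq_foldl_insertBy, List.foldl_append, ← PySem.List.sorted_eq_foldl_insertBy]
      rfl
    have hpw : (PySem.List.sorted xs pvKey).Pairwise (fun a c => pvKey a ≤ pvKey c) :=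
      PySem.List.sorted_pairwise xs pvKey
    by_cases hx : x ∈ xs
    · have hx' : x ∈ PySem.List.sorted xs pvKey := ((PySem.List.sorted_perm xs pvKey false).mem_iff).2 hx
      rw [hstep, pv_ofList_insertBy_mem hx' hpw, ih, pv_ofList_append, List.foldl_cons,
        List.foldl_nil, pv_add_of_mem ((PySem.Set.mem_ofList xs x).2 hx)]
    · have hx' : x ∉ PySem.List.sorted xs pvKey :=
        fun h => hx (((PySem.List.sorted_perm xs pvKey false).mem_iff).1 h)
      rw [hstep, pv_ofList_insertBy_not_mem hx' hpw, ih, pv_ofList_append, List.foldl_cons,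
        List.foldl_nil, pv_add_of_not_mem (fun h => hx ((PySem.Set.mem_ofList xs x).1 h)),
        hstep]

-- A's loop (with seen = result as an invariant) is take 5 of the running dedup
theorem pv_aLoop_take (xs : List (List Int)) :
    ∀ s : List (List Int), s.length < 5 →
      pvALoop xs s s = (xs.foldl PySem.Set.add s).take 5 := by
  induction xs with
  | nil =>
    intro s hs
    simp [pvALoop, List.take_of_length_le (Nat.le_of_lt hs)]
  | cons p t ih =>
    intro s hs
    by_cases hp : p ∈ s
    · rw [List.foldl_cons, pv_add_of_mem hp]
      simpa [pvALoop, PySem.Set.contains, List.contains_iff_mem, hp] using ih s hs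
    · have hc : PySem.Set.contains s p = false := by
        simp [PySem.Set.contains, hp]
      have hstep : pvALoop (p :: t) s s
          = if (s ++ [p]).length = 5 then s ++ [p] else pvALoop t (s ++ [p]) (s ++ [p]) := by
        simp only [pvALoop, hc, Bool.false_eq_true, if_false, pv_add_of_not_mem hp]
      rw [List.foldl_cons, pv_add_of_not_mem hp, hstep]
      by_cases h5 : (s ++ [p]).length = 5
      · rw [if_pos h5]
        obtain ⟨r, hr, -⟩ := pv_foldl_add_prefix t (s ++ [p])
        rw [hr, ← h5, List.take_left]
      · rw [if_neg h5]
        refine ih _ ?_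
        simp only [List.length_append, List.length_cons, List.length_nil] at h5 ⊢
        omega

-- B's dedup loop keeps seen = unique; both equal the running dedup fold
theorem pv_bFold (l : List (List Int)) :
    ∀ s : PySem.Set (List Int),
      l.foldl
        (fun (st : PySem.Set (List Int) × List (List Int)) p =>
          if PySem.Set.contains st.1 p then st else (PySem.Set.add st.1 p, st.2 ++ [p]))
        (s, s)
      = (l.foldl PySem.Set.add s, l.foldl PySem.Set.add s) := by
  induction l with
  | nil => intro s; simp
  | cons p t ih =>
    intro s
    by_cases hp : p ∈ s
    · simpa [PySem.Set.contains, List.contains_iff_mem, hp, pv_add_of_mem hp] using ih s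
    · have : PySem.Set.add s p = s ++ [p] := pv_add_of_not_mem hp
      simpa [PySem.Set.contains, List.contains_iff_mem, hp, this] using ih (s ++ [p])

-- ===== VERDICT (by name: the statement is the Claim_ definition above) =====
theorem get_top3_points_by_x2_spec : Claim_equal_get_top3_points_by_x2 := by
  intro points _ _
  unfold Spec_get_top3_points_by_x2 get_top3_points_by_x2 get_top3_points_by_x2_alt
  show pvALoop (PySem.List.sorted points pvKey) [] []
      = (PySem.List.sorted
          (points.foldl
            (fun (st : PySem.Set (List Int) × List (List Int)) p =>
              if PySem.Set.contains st.1 p then st else (PySem.Set.add st.1 p, st.2 ++ [p]))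
            (([] : List (List Int)), ([] : List (List Int)))).2 pvKey).take 5
  rw [pv_bFold points ([] : List (List Int)),
    pv_aLoop_take (PySem.List.sorted points pvKey) [] (by norm_num)]
  show (PySem.Set.ofList (PySem.List.sorted points pvKey)).take 5 = _
  rw [pv_ofList_sorted]
  rfl
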